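-- pv_equiv track=rewrite | github.com/HyZync/hyzync | backend/processor.py | fix_unescaped_quotes
-- ===== SOURCE A (Python) =====
-- def fix_unescaped_quotes(json_str: str) -> str:
--     """Iterates through JSON string and escapes unescaped internal double quotes."""
--     escape_next = False
--     fixed_chars = []
--
--     for i, char in enumerate(json_str):
--         if escape_next:
--             fixed_chars.append(char)
--             escape_next = False
--             continue
--
--         if char == '\\':
--             fixed_chars.append(char)
--             escape_next = True
--             continue
--
--         if char == '"':
--             # Check context to see if it's a structural quote
--             prev_char = ''
--             for j in range(i - 1, -1, -1):
--                 if not json_str[j].isspace():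
--                     prev_char = json_str[j]
--                     break
--
--             next_char = ''
--             for j in range(i + 1, len(json_str)):
--                 if not json_str[j].isspace():
--                     next_char = json_str[j]
--                     break
--
--             is_structural_start = prev_char in ('{', ',', ':', '[')
--             is_structural_end = next_char in ('}', ',', ':', ']')
--
--             if is_structural_start or is_structural_end:
--                  fixed_chars.append('"')
--             else:
--                  fixed_chars.append('\\"')
--         else:
--             fixed_chars.append(char)
--
--     return "".join(fixed_chars)
-- ===== SOURCE B (Python) =====
-- def fix_unescaped_quotes(json_str: str) -> str:
--     """Precompute nearest non-space char to the right of each position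
--     in one right-to-left pass; track nearest non-space to the left as running
--     state in a single left-to-right pass."""
--     nx = ''
--     next_ns = []
--     for c in reversed(json_str):
--         next_ns.append(nx)
--         if not c.isspace():
--             nx = c
--     next_ns.reverse()
--
--     out = []
--     esc = False
--     prev = ''
--     for c, nxt in zip(json_str, next_ns):
--         if esc:
--             out.append(c)
--             esc = False
--         elif c == '\\':
--             out.append(c)
--             esc = True
--         elif c == '"':
--             if prev in ('{', ',', ':', '[') or nxt in ('}', ',', ':', ']'):
--                 out.append('"')
--             else:
--                 out.append('\\"')
--         else:
--             out.append(c)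
--         if not c.isspace():
--             prev = c
--     return "".join(out)
-- ===== Notes on version B (the rewrite author's own statement) =====
-- stated objective: alternative
-- what changed: Replaced A's per-quote backward and forward whitespace scans with one right-to-left pass precomputing each position's nearest non-space right neighbor plus a running left-neighbor state, so each quote is classified in O(1); it trades A's worst-case quadratic rescanning for two fixed passes (not measurably faster on the timing inputs).
import Mathlib
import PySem

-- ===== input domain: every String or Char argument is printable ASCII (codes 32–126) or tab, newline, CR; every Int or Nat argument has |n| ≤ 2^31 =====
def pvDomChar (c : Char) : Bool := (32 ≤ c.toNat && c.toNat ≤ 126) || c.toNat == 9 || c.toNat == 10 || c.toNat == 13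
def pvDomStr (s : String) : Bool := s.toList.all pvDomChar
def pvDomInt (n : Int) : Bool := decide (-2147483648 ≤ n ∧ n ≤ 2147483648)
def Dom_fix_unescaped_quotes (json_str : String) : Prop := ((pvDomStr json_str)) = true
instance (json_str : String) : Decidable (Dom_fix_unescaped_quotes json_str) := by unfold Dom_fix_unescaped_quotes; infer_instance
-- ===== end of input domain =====

-- B replaces A's per-quote backward/forward whitespace scans with one
-- precomputed next-non-space array and a running previous-non-space state
-- (objective: alternative single-pass-per-direction algorithm).

-- ===== PORT A =====
-- backward scan 'for j in range(i-1,-1,-1): … break' (argument = current index i)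
def pvPrevCharA (s : List Char) : Nat → String
  | 0 => ""
  | j + 1 =>
    let c := s.getD j ' '
    if PySem.Chars.isspace c then pvPrevCharA s j else String.mk [c]

-- forward scan 'for j in range(i+1,len(s)): … break', applied to s.drop (i+1)
def pvNextScanA : List Char → String
  | [] => ""
  | c :: rest => if PySem.Chars.isspace c then pvNextScanA rest else String.mk [c]

-- the main 'for i, char in enumerate(json_str)' loop of A
def pvLoopA (s : List Char) : Nat → Bool → List Char → List Char
  | _, _, [] => []
  | i, esc, c :: rest =>
    if esc then c :: pvLoopA s (i + 1) false rest
    else if c = '\\' then c :: pvLoopA s (i + 1) true rest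
    else if c = '"' then
      let prev := pvPrevCharA s i
      let next := pvNextScanA (s.drop (i + 1))
      if prev = "{" ∨ prev = "," ∨ prev = ":" ∨ prev = "[" ∨
         next = "}" ∨ next = "," ∨ next = ":" ∨ next = "]" then
        '"' :: pvLoopA s (i + 1) false rest
      else '\\' :: '"' :: pvLoopA s (i + 1) false rest
    else c :: pvLoopA s (i + 1) false rest

def fix_unescaped_quotes (json_str : String) : String :=
  String.mk (pvLoopA json_str.toList 0 false json_str.toList)

-- ===== PORT B =====
-- Source B's right-to-left pass: .2 is the per-position nearest non-space char to
-- the right (Source B's next_ns list), .1 the running 'nx' state at the left end.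
def pvNextArr : List Char → String × List String
  | [] => ("", [])
  | c :: rest =>
    let p := pvNextArr rest
    (if PySem.Chars.isspace c then p.1 else String.mk [c], p.1 :: p.2)

-- Source B's single left-to-right pass over zip(json_str, next_ns), carrying (esc, prev)
def pvLoopB : Bool → String → List (Char × String) → List Char
  | _, _, [] => []
  | esc, p, (c, nx) :: rest =>
    let p' := if PySem.Chars.isspace c then p else String.mk [c]
    if esc then c :: pvLoopB false p' rest
    else if c = '\\' then c :: pvLoopB true p' rest
    else if c = '"' then
      if p = "{" ∨ p = "," ∨ p = ":" ∨ p = "[" ∨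
         nx = "}" ∨ nx = "," ∨ nx = ":" ∨ nx = "]" then
        '"' :: pvLoopB false p' rest
      else '\\' :: '"' :: pvLoopB false p' rest
    else c :: pvLoopB false p' rest

def fix_unescaped_quotes_alt (json_str : String) : String :=
  let s := json_str.toList
  String.mk (pvLoopB false "" (s.zip (pvNextArr s).2))

-- ===== PRECONDITION & SPEC =====
def Spec_fix_unescaped_quotes (json_str : String) (out : String) : Prop := out = fix_unescaped_quotes_alt json_str
instance (json_str : String) (out : String) : Decidable (Spec_fix_unescaped_quotes json_str out) := by unfold Spec_fix_unescaped_quotes; infer_instance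

-- ===== CLAIM (what is proved, stated in full; the proofs are below) =====
def Claim_equal_fix_unescaped_quotes : Prop := ∀ (json_str : String), Dom_fix_unescaped_quotes json_str → Spec_fix_unescaped_quotes json_str (fix_unescaped_quotes json_str)

-- ===== LEMMAS AND PROOFS =====

-- the running 'nx' state of B's first pass is exactly A's forward scan
theorem pvNextArr_fst (s : List Char) : (pvNextArr s).1 = pvNextScanA s := by
  induction s with
  | nil => rfl
  | cons c rest ih => simp [pvNextArr, pvNextScanA, ih]

theorem pvLoop_eq (s : List Char) :
    ∀ (rest : List Char) (i : Nat) (esc : Bool), rest = s.drop i →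
      pvLoopA s i esc rest = pvLoopB esc (pvPrevCharA s i) (rest.zip (pvNextArr rest).2) := by
  intro rest
  induction rest with
  | nil => intro i esc _; rfl
  | cons c rest' ih =>
    intro i esc hdrop
    have hget : s[i]? = some c := by
      have h0 : (s.drop i)[0]? = s[i]? := by simp
      rw [← h0, ← hdrop]; rfl
    have hdrop' : rest' = s.drop (i + 1) := by
      have : s.drop (i + 1) = (s.drop i).drop 1 := by
        rw [List.drop_drop]
      rw [this, ← hdrop]; rfl
    have hprev : pvPrevCharA s (i + 1) =
        (if PySem.Chars.isspace c then pvPrevCharA s i else String.mk [c]) := by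
      simp [pvPrevCharA, hget]
    have hnext : pvNextScanA (s.drop (i + 1)) = (pvNextArr rest').1 := by
      rw [pvNextArr_fst, hdrop']
    have ihA := ih (i + 1) false hdrop'
    have ihB := ih (i + 1) true hdrop'
    simp only [pvLoopA, pvLoopB, pvNextArr, List.zip_cons_cons, hnext]
    by_cases hesc : esc = true
    · subst hesc; simp [ihA, hprev]
    · replace hesc : esc = false := by cases esc <;> simp_all
      subst hesc
      by_cases hbs : c = '\\'
      · subst hbs; simp [ihB, hprev]
      · by_cases hq : c = '"'
        · subst hq; simp [hbs, ihA, hprev]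
        · simp [hbs, hq, ihA, hprev]

-- ===== VERDICT (by name: the statement is the Claim_ definition above) =====
theorem fix_unescaped_quotes_spec : Claim_equal_fix_unescaped_quotes := by
  intro json_str _
  unfold Spec_fix_unescaped_quotes fix_unescaped_quotes fix_unescaped_quotes_alt
  rw [pvLoop_eq json_str.toList json_str.toList 0 false (by simp)]
  rfl
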